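-- pv_equiv track=rewrite | github.com/DrishakMohan/Python | More _Of_For_Loops.py | whitespace_counter
-- ===== SOURCE A (Python) =====
-- def whitespace_counter (in_str:str) -> int:
--     space = 0
--
--     for i in in_str:
--         if i == " ":
--             space += 1
--
--     return space
--
--     """
--     for i in (in_str.split(" ")):
--         space += 1
--
--     return (space-1)
--     """
-- ===== SOURCE B (Python) =====
-- def whitespace_counter(in_str: str) -> int:
--     return len(in_str.split(" ")) - 1
-- ===== Notes on version B (the rewrite author's own statement) =====
-- stated objective: simpler
-- what changed: Replaces the character-by-character counting loop with a one-line derivation: splitting on the explicit single-space separator yields exactly count+1 pieces, so the space count is len(split)-1.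
import Mathlib
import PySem

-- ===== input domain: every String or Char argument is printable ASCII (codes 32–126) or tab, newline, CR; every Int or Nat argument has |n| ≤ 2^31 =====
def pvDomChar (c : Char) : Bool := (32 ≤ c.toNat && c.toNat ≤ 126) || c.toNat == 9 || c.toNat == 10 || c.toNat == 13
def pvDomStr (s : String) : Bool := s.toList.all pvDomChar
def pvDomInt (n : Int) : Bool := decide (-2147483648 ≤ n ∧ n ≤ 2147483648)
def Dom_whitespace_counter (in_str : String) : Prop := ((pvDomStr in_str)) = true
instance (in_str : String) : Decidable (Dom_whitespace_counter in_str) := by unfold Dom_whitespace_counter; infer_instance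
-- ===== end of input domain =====

-- B derives the space count as len(in_str.split(" ")) - 1 instead of scanning with a counter (simpler).

-- ===== PORT A =====
def whitespace_counter (in_str : String) : Int :=
  in_str.toList.foldl (fun space i => if i == ' ' then space + 1 else space) 0

-- ===== PORT B =====
def whitespace_counter_alt (in_str : String) : Int :=
  (((PySem.Str.split? in_str " ").getD []).length : Int) - 1

-- ===== PRECONDITION & SPEC =====
def Spec_whitespace_counter (in_str : String) (out : Int) : Prop := out = whitespace_counter_alt in_str
instance (in_str : String) (out : Int) : Decidable (Spec_whitespace_counter in_str out) := by unfold Spec_whitespace_counter; infer_instance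

-- ===== CLAIM (what is proved, stated in full; the proofs are below) =====
def Claim_equal_whitespace_counter : Prop := ∀ (in_str : String), Dom_whitespace_counter in_str → Spec_whitespace_counter in_str (whitespace_counter in_str)

-- ===== LEMMAS AND PROOFS =====

theorem splitOn_go_space_length (fuel : Nat) (l cur : List Char) (acc : List (List Char))
    (h : l.length < fuel) :
    (PySem.Chars.splitOn.go [' '] fuel l cur acc).length = acc.length + l.count ' ' + 1 := by
  induction fuel generalizing l cur acc with
  | zero => omega
  | succ fuel ih =>
    cases l with
    | nil => simp [PySem.Chars.splitOn.go]
    | cons c rest =>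
      by_cases hc : c = ' '
      · subst hc
        have hpre : [' '].isPrefixOf (' ' :: rest) = true := by simp [List.isPrefixOf]
        simp only [PySem.Chars.splitOn.go, hpre, if_true, List.length_cons, List.drop_succ_cons,
          List.length_nil, List.drop_zero]
        rw [ih rest [] ((List.reverse cur) :: acc) (by simpa using Nat.lt_of_succ_lt_succ h)]
        simp only [List.length_cons, List.count_cons, beq_self_eq_true, if_true]
        omega
      · have hpre : [' '].isPrefixOf (c :: rest) = false := by
          simp only [List.isPrefixOf, Bool.and_eq_false_iff, beq_eq_false_iff_ne, ne_eq]
          exact Or.inl (fun h => hc h.symm)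
        simp only [PySem.Chars.splitOn.go, hpre, Bool.false_eq_true, if_false]
        rw [ih rest (c :: cur) acc (by simpa using Nat.lt_of_succ_lt_succ h)]
        simp [hc]

theorem splitOn_space_length (cs : List Char) :
    (PySem.Chars.splitOn cs [' ']).length = cs.count ' ' + 1 := by
  unfold PySem.Chars.splitOn
  rw [splitOn_go_space_length cs.length.succ cs [] [] (Nat.lt_succ_self _)]
  simp

-- ===== VERDICT (by name: the statement is the Claim_ definition above) =====
theorem whitespace_counter_spec : Claim_equal_whitespace_counter := by
  intro s _
  unfold Spec_whitespace_counter whitespace_counter whitespace_counter_alt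
  rw [PySem.List.foldl_beq_add_one]
  unfold PySem.Str.split? PySem.Chars.split?
  simp [splitOn_space_length]
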